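-- pv_equiv track=rewrite | github.com/keepcalmandcodecodecode/aoc2015 | days/day05.py | is_nice_part_one
-- ===== SOURCE A (Python) =====
-- def is_nice_part_one(string):
--     length = len(string)
--     vowels = "aeiou"
--     vowels_count = 0
--     contains_double = False
--     for idx, x in enumerate(string):
--         #check naughty substrings: ab, cd, pq, or xy
--         if x == "a" and idx < (length-1):
--             if string[idx+1] == "b":
--                 return False
--         if x == "p" and idx < (length-1):
--             if string[idx+1] == "q":
--                 return False
--         if x == "c" and idx < (length-1):
--             if string[idx+1] == "d":
--                 return False
--         if x == "x" and idx < (length-1):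
--             if string[idx+1] == "y":
--                 return False
--         #check vowels
--         if vowels.find(x) != -1:
--             vowels_count = vowels_count + 1
--         #check double letters
--         if idx > 0 and x == string[idx-1]:
--             contains_double = contains_double or True
--     return vowels_count >= 3 and contains_double
-- ===== SOURCE B (Python) =====
-- def is_nice_part_one(string):
--     if any(bad in string for bad in ("ab", "cd", "pq", "xy")):
--         return False
--     vowels = sum(c in "aeiou" for c in string)
--     double = any(a == b for a, b in zip(string, string[1:]))
--     return vowels >= 3 and double
-- ===== Notes on version B (the rewrite author's own statement) =====
-- stated objective: simpler
-- what changed: Replaces A's single fused index-based scan (early returns, string[idx+1]/string[idx-1] indexing) by three separate passes: substring search for the four forbidden pairs, a comprehension sum for vowels, and a zip-of-adjacent-pairs scan for the double letter.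
import Mathlib
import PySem

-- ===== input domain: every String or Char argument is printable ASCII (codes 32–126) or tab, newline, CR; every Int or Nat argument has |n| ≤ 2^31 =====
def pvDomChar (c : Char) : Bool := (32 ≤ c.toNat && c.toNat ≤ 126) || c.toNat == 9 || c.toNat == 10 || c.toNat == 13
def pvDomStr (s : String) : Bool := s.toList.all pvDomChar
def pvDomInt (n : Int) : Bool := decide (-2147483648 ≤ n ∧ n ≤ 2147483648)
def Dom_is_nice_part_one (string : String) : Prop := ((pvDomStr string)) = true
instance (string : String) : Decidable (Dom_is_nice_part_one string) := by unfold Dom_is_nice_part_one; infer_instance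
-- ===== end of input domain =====

-- B replaces A's single fused index-based scan by three separate passes: substring search for the four forbidden pairs, a vowel-count sum, and a zip-of-adjacent-pairs double check; same return value, no side effects.


-- ===== PORT A =====
-- A's enumerate loop; the early 'return False' is the immediate false result
def is_nice_loopA (s : List Char) (length : Int) : List (Int × Char) → Int → Bool → Bool
  | [], vc, cd => decide (vc ≥ 3) && cd
  | (idx, x) :: rest, vc, cd =>
    if x = 'a' ∧ idx < length - 1 ∧ PySem.List.pyGet? s (idx + 1) = some 'b' then false
    else if x = 'p' ∧ idx < length - 1 ∧ PySem.List.pyGet? s (idx + 1) = some 'q' then false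
    else if x = 'c' ∧ idx < length - 1 ∧ PySem.List.pyGet? s (idx + 1) = some 'd' then false
    else if x = 'x' ∧ idx < length - 1 ∧ PySem.List.pyGet? s (idx + 1) = some 'y' then false
    else
      let vc' := if PySem.Chars.find "aeiou".toList [x] ≠ -1 then vc + 1 else vc
      let cd' := if idx > 0 ∧ PySem.List.pyGet? s (idx - 1) = some x then cd || true else cd
      is_nice_loopA s length rest vc' cd'

def is_nice_part_one (string : String) : Bool :=
  let s := string.toList
  is_nice_loopA s ((s.length : Nat) : Int) (PySem.List.enumerate s 0) 0 false

-- ===== PORT B =====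
def is_nice_part_one_alt (string : String) : Bool :=
  if ["ab", "cd", "pq", "xy"].any (fun bad => PySem.Str.isIn bad string) then false
  else
    let s := string.toList
    -- sum(c in "aeiou" for c in string): each True counts 1
    let vowels : Int := (s.map (fun c => if PySem.Chars.isIn [c] "aeiou".toList then (1 : Int) else 0)).sum
    -- zip(string, string[1:]); the slice [1:] is drop 1
    let double := (s.zip (s.drop 1)).any (fun p => p.1 == p.2)
    decide (vowels ≥ 3) && double

-- ===== PRECONDITION & SPEC =====
def Spec_is_nice_part_one (string : String) (out : Bool) : Prop := out = is_nice_part_one_alt string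
instance (string : String) (out : Bool) : Decidable (Spec_is_nice_part_one string out) := by unfold Spec_is_nice_part_one; infer_instance

-- ===== CLAIM (what is proved, stated in full; the proofs are below) =====
def Claim_equal_is_nice_part_one : Prop := ∀ (string : String), Dom_is_nice_part_one string → Spec_is_nice_part_one string (is_nice_part_one string)

-- ===== LEMMAS AND PROOFS =====

-- proof-side reference notions over the char list
def pvForbidden (p : Char × Char) : Bool :=
  (p.1 == 'a' && p.2 == 'b') || (p.1 == 'p' && p.2 == 'q') ||
  (p.1 == 'c' && p.2 == 'd') || (p.1 == 'x' && p.2 == 'y')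
def pvHasBad (l : List Char) : Bool := (l.zip (l.drop 1)).any pvForbidden
def pvDouble (l : List Char) : Bool := (l.zip (l.drop 1)).any (fun p => p.1 == p.2)
def pvVC (l : List Char) : Int := (l.map (fun c => if PySem.Chars.isIn [c] "aeiou".toList then (1 : Int) else 0)).sum

theorem pair_infix_iff (a b : Char) (l : List Char) :
    [a, b] <:+: l ↔ (a, b) ∈ l.zip (l.drop 1) := by
  induction l with
  | nil => simp
  | cons c t ih =>
    cases t with
    | nil =>
      constructor
      · intro h; have := h.length_le; simp at this
      · intro h; simp at h
    | cons d t' =>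
      rw [List.infix_cons_iff]
      simp only [List.drop_succ_cons, List.drop_zero, List.zip_cons_cons, List.mem_cons]
      simp only [List.drop_succ_cons, List.drop_zero] at ih
      constructor
      · rintro (h | h)
        · rcases h with ⟨u, hu⟩
          injection hu with h1 hu; injection hu with h2 _
          left; rw [h1, h2]
        · right; exact ih.mp h
      · rintro (h | h)
        · left; injection h with h1 h2; rw [h1, h2]; exact ⟨t', rfl⟩
        · right; exact ih.mpr h
theorem toList_lit : "ab".toList = ['a','b'] ∧ "cd".toList = ['c','d'] ∧ "pq".toList = ['p','q'] ∧ "xy".toList = ['x','y'] := by decide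

theorem badAny_eq (s : String) :
    (["ab", "cd", "pq", "xy"].any (fun bad => PySem.Str.isIn bad s)) = pvHasBad s.toList := by
  have ext : ∀ a b : Bool, (a = true ↔ b = true) → a = b := by decide
  apply ext
  simp only [pvHasBad, List.any_eq_true]
  constructor
  · rintro ⟨bad, hb, hin⟩
    rw [PySem.Str.isIn_iff_infix] at hin
    fin_cases hb
    · rw [toList_lit.1] at hin
      exact ⟨('a','b'), (pair_infix_iff 'a' 'b' _).mp hin, by decide⟩
    · rw [toList_lit.2.1] at hin
      exact ⟨('c','d'), (pair_infix_iff 'c' 'd' _).mp hin, by decide⟩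
    · rw [toList_lit.2.2.1] at hin
      exact ⟨('p','q'), (pair_infix_iff 'p' 'q' _).mp hin, by decide⟩
    · rw [toList_lit.2.2.2] at hin
      exact ⟨('x','y'), (pair_infix_iff 'x' 'y' _).mp hin, by decide⟩
  · rintro ⟨⟨a, b⟩, hmem, hf⟩
    simp only [pvForbidden, Bool.or_eq_true, Bool.and_eq_true, beq_iff_eq] at hf
    rcases hf with ((⟨rfl, rfl⟩ | ⟨rfl, rfl⟩) | ⟨rfl, rfl⟩) | ⟨rfl, rfl⟩
    · exact ⟨"ab", by simp, by rw [PySem.Str.isIn_iff_infix, toList_lit.1]; exact (pair_infix_iff _ _ _).mpr hmem⟩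
    · exact ⟨"pq", by simp, by rw [PySem.Str.isIn_iff_infix, toList_lit.2.2.1]; exact (pair_infix_iff _ _ _).mpr hmem⟩
    · exact ⟨"cd", by simp, by rw [PySem.Str.isIn_iff_infix, toList_lit.2.1]; exact (pair_infix_iff _ _ _).mpr hmem⟩
    · exact ⟨"xy", by simp, by rw [PySem.Str.isIn_iff_infix, toList_lit.2.2.2]; exact (pair_infix_iff _ _ _).mpr hmem⟩
theorem vc_step (x : Char) (vc : Int) :
    (if PySem.Chars.find "aeiou".toList [x] ≠ -1 then vc + 1 else vc) = vc + pvVC [x] := by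
  have hiff : (PySem.Chars.find "aeiou".toList [x] ≠ -1) ↔ PySem.Chars.isIn [x] "aeiou".toList = true := by
    rw [PySem.Chars.find_ne_neg_one_iff, PySem.Chars.isIn_iff_infix]
  simp only [pvVC, List.map_cons, List.map_nil, List.sum_cons, List.sum_nil]
  split_ifs with h1 h2 h2 <;> simp_all <;> omega

theorem cd_step (pre : List Char) (x : Char) (tail : List Char) (cd : Bool) :
    (if ((pre.length : Int) > 0 ∧
          PySem.List.pyGet? (pre ++ x :: tail) ((pre.length : Int) - 1) = some x)
       then cd || true else cd) = (cd || (pre.getLast? == some x)) := by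
  have hiff : ((pre.length : Int) > 0 ∧
        PySem.List.pyGet? (pre ++ x :: tail) ((pre.length : Int) - 1) = some x)
      ↔ (pre.getLast? == some x) = true := by
    constructor
    · rintro ⟨hpos, hget⟩
      have hp : 1 ≤ pre.length := by exact_mod_cast hpos
      have hc : ((pre.length : Int) - 1) = ((pre.length - 1 : Nat) : Int) := by omega
      rw [hc, PySem.List.pyGet?_natCast] at hget
      rw [List.getElem?_append_left (by omega)] at hget
      rw [beq_iff_eq, List.getLast?_eq_getElem?]
      exact hget
    · intro hlast
      rw [beq_iff_eq, List.getLast?_eq_getElem?] at hlast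
      have hp : 1 ≤ pre.length := by
        rcases pre with _ | _ <;> simp_all
      refine ⟨by exact_mod_cast hp, ?_⟩
      have hc : ((pre.length : Int) - 1) = ((pre.length - 1 : Nat) : Int) := by omega
      rw [hc, PySem.List.pyGet?_natCast]
      rw [List.getElem?_append_left (by omega)]
      exact hlast
  split_ifs with h
  · simp [hiff.mp h]
  · by_cases h2 : (pre.getLast? == some x) = true
    · exact absurd (hiff.mpr h2) h
    · rw [Bool.not_eq_true] at h2
      rw [h2]; simp

theorem loopA_eq (rest : List Char) : ∀ (pre : List Char) (x : Char) (vc : Int) (cd : Bool),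
    is_nice_loopA (pre ++ x :: rest) (((pre ++ x :: rest).length : Nat) : Int)
        (PySem.List.enumerate (x :: rest) (pre.length : Int)) vc cd =
      (if pvHasBad (x :: rest) then false
       else decide (vc + pvVC (x :: rest) ≥ 3) &&
         (cd || (pre.getLast? == some x) || pvDouble (x :: rest))) := by
  induction rest with
  | nil =>
    intro pre x vc cd
    rw [PySem.List.enumerate_cons, PySem.List.enumerate_nil]
    unfold is_nice_loopA
    have hlen : ¬ ((pre.length : Int) < (((pre ++ [x]).length : Nat) : Int) - 1) := by
      simp
    rw [if_neg (fun h => hlen h.2.1), if_neg (fun h => hlen h.2.1),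
        if_neg (fun h => hlen h.2.1), if_neg (fun h => hlen h.2.1)]
    simp only []
    rw [vc_step, cd_step pre x [] cd]
    unfold is_nice_loopA
    have h1 : pvHasBad [x] = false := by simp [pvHasBad]
    have h2 : pvDouble [x] = false := by simp [pvDouble]
    rw [h1, h2]
    simp
  | cons y rest' ih =>
    intro pre x vc cd
    rw [PySem.List.enumerate_cons]
    unfold is_nice_loopA
    have hlen : ((pre.length : Int) < (((pre ++ x :: y :: rest').length : Nat) : Int) - 1) := by
      simp; omega
    have hnext : PySem.List.pyGet? (pre ++ x :: y :: rest') ((pre.length : Int) + 1) = some y := by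
      have hc : ((pre.length : Int) + 1) = ((pre.length + 1 : Nat) : Int) := by omega
      rw [hc, PySem.List.pyGet?_natCast]
      rw [List.getElem?_append_right (by omega)]
      simp
    have hbadsplit : pvHasBad (x :: y :: rest') = (pvForbidden (x, y) || pvHasBad (y :: rest')) := by
      simp [pvHasBad]
    have hdubsplit : pvDouble (x :: y :: rest') = ((x == y) || pvDouble (y :: rest')) := by
      simp [pvDouble]
    by_cases hb : pvForbidden (x, y) = true
    · rw [hbadsplit, hb, Bool.true_or, if_pos rfl]
      simp only [pvForbidden, Bool.or_eq_true, Bool.and_eq_true, beq_iff_eq] at hb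
      rcases hb with ((⟨rfl, rfl⟩ | ⟨rfl, rfl⟩) | ⟨rfl, rfl⟩) | ⟨rfl, rfl⟩
      · rw [if_pos ⟨rfl, hlen, hnext⟩]
      · rw [if_neg (by rintro ⟨h, -⟩; cases h), if_pos ⟨rfl, hlen, hnext⟩]
      · rw [if_neg (by rintro ⟨h, -⟩; cases h), if_neg (by rintro ⟨h, -⟩; cases h),
            if_pos ⟨rfl, hlen, hnext⟩]
      · rw [if_neg (by rintro ⟨h, -⟩; cases h), if_neg (by rintro ⟨h, -⟩; cases h),
            if_neg (by rintro ⟨h, -⟩; cases h), if_pos ⟨rfl, hlen, hnext⟩]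
    · rw [if_neg ?na, if_neg ?np, if_neg ?nc, if_neg ?nx]
      case na =>
        rintro ⟨rfl, -, hg⟩
        rw [hnext] at hg; injection hg with hy; subst hy
        simp [pvForbidden] at hb
      case np =>
        rintro ⟨rfl, -, hg⟩
        rw [hnext] at hg; injection hg with hy; subst hy
        simp [pvForbidden] at hb
      case nc =>
        rintro ⟨rfl, -, hg⟩
        rw [hnext] at hg; injection hg with hy; subst hy
        simp [pvForbidden] at hb
      case nx =>
        rintro ⟨rfl, -, hg⟩
        rw [hnext] at hg; injection hg with hy; subst hy
        simp [pvForbidden] at hb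
      simp only []
      rw [vc_step, cd_step pre x (y :: rest') cd]
      have hrec := ih (pre ++ [x]) y (vc + pvVC [x]) (cd || (pre.getLast? == some x))
      rw [← List.append_cons] at hrec
      have hlenc : (((pre ++ [x]).length : Nat) : Int) = (pre.length : Int) + 1 := by simp
      rw [hlenc] at hrec
      rw [hrec]
      rw [hbadsplit, Bool.not_eq_true] at *
      rw [hb, Bool.false_or] at *
      rw [hdubsplit]
      split_ifs with hbad
      · rfl
      · have hlast : ((pre ++ [x]).getLast? == some y) = (x == y) := by
          simp [List.getLast?_append]
        rw [hlast]
        have hsum : vc + pvVC [x] + pvVC (y :: rest') = vc + pvVC (x :: y :: rest') := by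
          simp [pvVC]; ring
        rw [hsum]
        congr 1
        rcases cd <;> rcases (pre.getLast? == some x) <;> rcases (x == y) <;>
          rcases pvDouble (y :: rest') <;> rfl
theorem ab_eq (s : String) : is_nice_part_one s = is_nice_part_one_alt s := by
  unfold is_nice_part_one is_nice_part_one_alt
  simp only [badAny_eq]
  cases hs : s.toList with
  | nil =>
    simp [is_nice_loopA, pvHasBad, PySem.List.enumerate_nil]
  | cons x t =>
    have key := loopA_eq t [] x 0 false
    simp only [List.nil_append, List.length_nil, Nat.cast_zero] at key
    rw [key]
    simp only [List.getLast?_nil]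
    split_ifs with hbad
    · rfl
    · simp [pvVC, pvDouble]

-- ===== VERDICT (by name: the statement is the Claim_ definition above) =====
theorem is_nice_part_one_spec : Claim_equal_is_nice_part_one := by
  intro string _
  unfold Spec_is_nice_part_one
  exact ab_eq string
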